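-- pv_equiv track=rewrite | github.com/luvrgz/roller-bearing-optimisation | src/roller_design.py | find_first_positive_index
-- ===== SOURCE A (Python) =====
-- def find_first_positive_index(X, increasing=True):
--     low, high = 0, len(X)
--     while low < high:
--         mid = (low + high) // 2
--         if (X[mid] > 0 if increasing else X[mid] < 0):
--             high = mid
--         else:
--             low = mid + 1
--     return low
-- ===== SOURCE B (Python) =====
-- def find_first_positive_index(X, increasing=True):
--     # Precompute the signed predicate once, then binary-search the boolean
--     # list by (low, span) halving: same probe sequence as a low/high search.
--     P = [(x > 0) if increasing else (x < 0) for x in X]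
--
--     def go(low, span):
--         if span == 0:
--             return low
--         half = span // 2
--         if P[low + half]:
--             return go(low, half)
--         return go(low + half + 1, span - half - 1)
--
--     return go(0, len(P))
-- ===== Notes on version B (the rewrite author's own statement) =====
-- stated objective: alternative
-- what changed: B first maps X to a boolean predicate list, then finds the first True by a recursive (low, span) halving search that carries the remaining span instead of mutating low/high bounds over X; the probe sequence is identical.
import Mathlib
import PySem

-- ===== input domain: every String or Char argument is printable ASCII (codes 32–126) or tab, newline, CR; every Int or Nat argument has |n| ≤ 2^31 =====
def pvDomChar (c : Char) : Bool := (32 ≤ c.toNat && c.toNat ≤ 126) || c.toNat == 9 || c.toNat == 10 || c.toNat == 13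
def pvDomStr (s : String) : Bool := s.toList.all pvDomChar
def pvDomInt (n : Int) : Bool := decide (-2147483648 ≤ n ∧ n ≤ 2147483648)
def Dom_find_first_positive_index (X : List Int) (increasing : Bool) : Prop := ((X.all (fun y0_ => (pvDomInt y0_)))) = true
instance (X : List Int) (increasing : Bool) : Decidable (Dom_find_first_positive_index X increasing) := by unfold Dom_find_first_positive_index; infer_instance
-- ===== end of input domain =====

-- B precomputes the predicate as a boolean list and searches it by a recursive (low, span)-halving helper instead of A's low/high while loop over X; same probe sequence, same result (alternative decomposition, not faster).

-- ===== PORT A =====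
-- A's while-loop with mutable low/high, as a recursion on the shrinking interval.
-- X[mid] is ported as getD: 0 ≤ low ≤ mid < high ≤ X.length throughout, so the index is always in range.
def pvA_loop (X : List Int) (increasing : Bool) (low high : Nat) : Nat :=
  if _h : low < high then
    let mid := (low + high) / 2
    if (if increasing then X.getD mid 0 > 0 else X.getD mid 0 < 0)
    then pvA_loop X increasing low mid
    else pvA_loop X increasing (mid + 1) high
  else low
termination_by high - low
decreasing_by all_goals omega

def find_first_positive_index (X : List Int) (increasing : Bool) : Int :=
  (pvA_loop X increasing 0 X.length : Int)

-- ===== PORT B =====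
-- B's recursive helper go(low, span) over the precomputed boolean list P.
def pvB_go (P : List Bool) (low span : Nat) : Nat :=
  if span = 0 then low
  else
    let half := span / 2
    if P.getD (low + half) false
    then pvB_go P low half
    else pvB_go P (low + half + 1) (span - half - 1)
termination_by span
decreasing_by all_goals omega

def find_first_positive_index_alt (X : List Int) (increasing : Bool) : Int :=
  let P := X.map (fun x => if increasing then decide (x > 0) else decide (x < 0))
  (pvB_go P 0 P.length : Int)

-- ===== PRECONDITION & SPEC =====
def Spec_find_first_positive_index (X : List Int) (increasing : Bool) (out : Int) : Prop := out = find_first_positive_index_alt X increasing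
instance (X : List Int) (increasing : Bool) (out : Int) : Decidable (Spec_find_first_positive_index X increasing out) := by unfold Spec_find_first_positive_index; infer_instance

-- ===== CLAIM (what is proved, stated in full; the proofs are below) =====
def Claim_equal_find_first_positive_index : Prop := ∀ (X : List Int) (increasing : Bool), Dom_find_first_positive_index X increasing → Spec_find_first_positive_index X increasing (find_first_positive_index X increasing)

-- ===== LEMMAS AND PROOFS =====
theorem pv_map_getD (X : List Int) (f : Int → Bool) (mid : Nat) (hm : mid < X.length) :
    (X.map f).getD mid false = f (X.getD mid 0) := by
  rw [List.getD_eq_getElem _ _ (by simpa using hm), List.getD_eq_getElem _ _ hm]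
  simp

theorem pvA_loop_eq_pvB_go (X : List Int) (increasing : Bool) (low high : Nat)
    (hhi : high ≤ X.length) :
    pvA_loop X increasing low high
      = pvB_go (X.map (fun x => if increasing then decide (x > 0) else decide (x < 0))) low (high - low) := by
  fun_induction pvA_loop X increasing low high with
  | case1 low high h mid hpos ih =>
      rw [pvB_go, if_neg (by omega : ¬ (high - low = 0))]
      have hmid : mid < X.length := by simp only [mid]; omega
      have heq : low + (high - low) / 2 = mid := by simp only [mid]; omega
      simp only [heq, pv_map_getD X _ mid hmid]
      rw [if_pos (by cases increasing <;> simp_all)]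
      have := ih (by omega)
      rw [show mid - low = (high - low) / 2 by simp only [mid]; omega] at this
      exact this
  | case2 low high h mid hpos ih =>
      rw [pvB_go, if_neg (by omega : ¬ (high - low = 0))]
      have hmid : mid < X.length := by simp only [mid]; omega
      have heq : low + (high - low) / 2 = mid := by simp only [mid]; omega
      simp only [heq, pv_map_getD X _ mid hmid]
      rw [if_neg (by cases increasing <;> simp_all)]
      have := ih hhi
      rw [show high - (mid + 1) = high - low - (high - low) / 2 - 1 by simp only [mid]; omega] at this
      exact this
  | case3 low high h =>
      rw [pvB_go, if_pos (by omega)]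

-- ===== VERDICT (by name: the statement is the Claim_ definition above) =====
theorem find_first_positive_index_spec : Claim_equal_find_first_positive_index := by
  intro X increasing _
  unfold Spec_find_first_positive_index find_first_positive_index find_first_positive_index_alt
  rw [pvA_loop_eq_pvB_go X increasing 0 X.length le_rfl]
  simp
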